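-- pv_equiv track=rewrite | github.com/kimkimj/Algorithm | python/programmersLvl2/discountEvent.py | solution
-- ===== SOURCE A (Python) =====
-- def solution(want, number, discount):
--     wishlist = {}
--     days = 0
--     for start_day in range(len(discount) - 10 + 1):
--         for i in range(len(want)):
--             wishlist[want[i]] = number[i]
--
--         can_be_added = True
--         for i in range(start_day, start_day + 10):
--             if discount[i] not in wishlist or wishlist[discount[i]] - 1 < 0:
--                 can_be_added = False
--                 break
--             else:
--                 wishlist[discount[i]] -= 1
--
--         if can_be_added:
--             days += 1
--     return days
-- ===== SOURCE B (Python) =====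
-- def solution(want, number, discount):
--     # Sliding window: keep running counts of the current 10-day window and a
--     # single 'excess' counter of over-allowance occurrences; each day shift
--     # updates only the item that leaves and the item that enters, instead of
--     # rebuilding and consuming a wishlist per window.
--     n = len(discount)
--     if n < 10:
--         return 0
--     allow = {want[i]: number[i] for i in range(len(want))}
--     cnt = {}
--     excess = 0
--     for i in range(10):
--         x = discount[i]
--         cnt[x] = cnt.get(x, 0) + 1
--         if cnt[x] > allow.get(x, 0):
--             excess += 1
--     days = 1 if excess == 0 else 0
--     for start in range(1, n - 9):
--         out = discount[start - 1]
--         if cnt[out] > allow.get(out, 0):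
--             excess -= 1
--         cnt[out] -= 1
--         new = discount[start + 9]
--         cnt[new] = cnt.get(new, 0) + 1
--         if cnt[new] > allow.get(new, 0):
--             excess += 1
--         if excess == 0:
--             days += 1
--     return days
-- ===== Notes on version B (the rewrite author's own statement) =====
-- stated objective: faster
-- what changed: A rebuilds the wishlist dict and consumes it item by item for every 10-day window; B slides a single window across discount, maintaining running counts and one 'excess' counter of over-allowance occurrences, updating only the leaving and entering item per day.
import Mathlib
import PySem

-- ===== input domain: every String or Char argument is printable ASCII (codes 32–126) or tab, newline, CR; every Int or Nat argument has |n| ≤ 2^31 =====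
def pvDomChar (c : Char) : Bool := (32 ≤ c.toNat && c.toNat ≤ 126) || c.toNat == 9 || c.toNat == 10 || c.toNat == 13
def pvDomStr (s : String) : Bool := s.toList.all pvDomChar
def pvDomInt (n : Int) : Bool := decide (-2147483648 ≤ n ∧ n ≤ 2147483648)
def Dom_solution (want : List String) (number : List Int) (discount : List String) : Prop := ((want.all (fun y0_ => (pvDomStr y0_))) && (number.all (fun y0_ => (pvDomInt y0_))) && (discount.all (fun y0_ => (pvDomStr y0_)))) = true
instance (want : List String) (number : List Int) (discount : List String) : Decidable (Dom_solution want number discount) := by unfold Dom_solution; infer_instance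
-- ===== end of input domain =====

-- B replaces A's per-window wishlist rebuild + consume-with-break by one sliding window
-- with running counts and a single over-allowance counter (objective: faster).

-- ===== PORT A =====
-- the `.getD ""` / `.getD 0` defaults are reached only where Python A raises IndexError
-- (number shorter than want with a nonempty outer loop); those inputs are outside Pre_solution.
def solution (want : List String) (number : List Int) (discount : List String) : Int :=
  (PySem.List.pyRange 0 ((discount.length : Int) - 10 + 1) 1).foldl
    (fun (st : PySem.Dict String Int × Int) start_day =>
      let wl := (PySem.List.pyRange 0 (want.length : Int) 1).foldl
        (fun d i => d.insert ((PySem.List.pyGet? want i).getD "")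
                             ((PySem.List.pyGet? number i).getD 0)) st.1
      let r := (PySem.List.pyRange start_day (start_day + 10) 1).foldl
        (fun (s : PySem.Dict String Int × Bool) i =>
          if s.2 then
            let d := (PySem.List.pyGet? discount i).getD ""
            match s.1.get? d with
            | none => (s.1, false)
            | some v => if v - 1 < 0 then (s.1, false) else (s.1.insert d (v - 1), true)
          else s) (wl, true)
      (r.1, if r.2 then st.2 + 1 else st.2))
    (PySem.Dict.empty, 0) |>.2

-- ===== PORT B =====
-- the `.getD ""` defaults are reached only where Python B raises IndexError (outside
-- Pre_solution); `cnt[out]` is ported as getD 0 — the key is always present (out is in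
-- the current window), so Python's KeyError is unreachable.
def solution_alt (want : List String) (number : List Int) (discount : List String) : Int :=
  if (discount.length : Int) < 10 then 0
  else
    let allow := (PySem.List.pyRange 0 (want.length : Int) 1).foldl
      (fun (d : PySem.Dict String Int) i =>
        d.insert ((PySem.List.pyGet? want i).getD "") ((PySem.List.pyGet? number i).getD 0))
      PySem.Dict.empty
    let st := (PySem.List.pyRange 0 10 1).foldl
      (fun (s : PySem.Dict String Int × Int) i =>
        let x := (PySem.List.pyGet? discount i).getD ""
        let c := s.1.getD x 0 + 1
        (s.1.insert x c, if c > allow.getD x 0 then s.2 + 1 else s.2))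
      (PySem.Dict.empty, 0)
    let days0 : Int := if st.2 = 0 then 1 else 0
    ((PySem.List.pyRange 1 ((discount.length : Int) - 9) 1).foldl
      (fun (s : PySem.Dict String Int × Int × Int) start =>
        let out := (PySem.List.pyGet? discount (start - 1)).getD ""
        let e1 := if s.1.getD out 0 > allow.getD out 0 then s.2.1 - 1 else s.2.1
        let cnt1 := s.1.insert out (s.1.getD out 0 - 1)
        let nw := (PySem.List.pyGet? discount (start + 9)).getD ""
        let c2 := cnt1.getD nw 0 + 1
        let e2 := if c2 > allow.getD nw 0 then e1 + 1 else e1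
        (cnt1.insert nw c2, e2, if e2 = 0 then s.2.2 + 1 else s.2.2))
      (st.1, st.2, days0)).2.2

-- ===== PRECONDITION & SPEC =====
-- Pre_ excludes exactly the inputs where both Pythons raise IndexError: number shorter
-- than want while discount has at least 10 entries (the loops run).
def Pre_solution (want : List String) (number : List Int) (discount : List String) : Prop :=
  want.length ≤ number.length ∨ discount.length < 10
instance (want : List String) (number : List Int) (discount : List String) : Decidable (Pre_solution want number discount) := by unfold Pre_solution; infer_instance
def pvWitness_solution : List String × List Int × List String :=
  (["a", "b"], [1, 2], ["a", "a", "b", "a", "b", "a", "a", "b", "a", "b", "a"])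

def Spec_solution (want : List String) (number : List Int) (discount : List String) (out : Int) : Prop := out = solution_alt want number discount
instance (want : List String) (number : List Int) (discount : List String) (out : Int) : Decidable (Spec_solution want number discount out) := by unfold Spec_solution; infer_instance

-- ===== CLAIM (what is proved, stated in full; the proofs are below) =====
def Claim_equal_solution : Prop := ∀ (want : List String) (number : List Int) (discount : List String), Dom_solution want number discount → Pre_solution want number discount → Spec_solution want number discount (solution want number discount)

-- ===== LEMMAS AND PROOFS =====

-- the allowance table both Pythons build from want/number (last pair wins), and lookups in it
def pairIns (d : PySem.Dict String Int) (p : String × Int) : PySem.Dict String Int := d.insert p.1 p.2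

def allowD (want : List String) (number : List Int) : PySem.Dict String Int :=
  (want.zip number).foldl pairIns PySem.Dict.empty

def agI (want : List String) (number : List Int) (k : String) : Int :=
  (allowD want number).getD k 0

-- the current 10-day window and the shared verdict on it
def winL (discount : List String) (a : Nat) : List String := (discount.drop a).take 10

def goodB (want : List String) (number : List Int) (discount : List String) (a : Nat) : Bool :=
  (winL discount a).all (fun k => decide (((winL discount a).count k : Int) ≤ agI want number k))

-- loop bodies of the two ports, named for the proofs (definitionally equal to the port lambdas)
def listStep (s : PySem.Dict String Int × Bool) (x : String) : PySem.Dict String Int × Bool :=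
  if s.2 then
    match s.1.get? x with
    | none => (s.1, false)
    | some v => if v - 1 < 0 then (s.1, false) else (s.1.insert x (v - 1), true)
  else s

def Abody (want : List String) (number : List Int) (discount : List String)
    (st : PySem.Dict String Int × Int) (start_day : Int) : PySem.Dict String Int × Int :=
  let wl := (PySem.List.pyRange 0 (want.length : Int) 1).foldl
    (fun d i => d.insert ((PySem.List.pyGet? want i).getD "")
                         ((PySem.List.pyGet? number i).getD 0)) st.1
  let r := (PySem.List.pyRange start_day (start_day + 10) 1).foldl
    (fun (s : PySem.Dict String Int × Bool) i =>
      listStep s ((PySem.List.pyGet? discount i).getD "")) (wl, true)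
  (r.1, if r.2 then st.2 + 1 else st.2)

def addStep (ag : String → Int) (s : PySem.Dict String Int × Int) (x : String) :
    PySem.Dict String Int × Int :=
  let c := s.1.getD x 0 + 1
  (s.1.insert x c, if c > ag x then s.2 + 1 else s.2)

def Bslide (allow : PySem.Dict String Int) (discount : List String)
    (s : PySem.Dict String Int × Int × Int) (start : Int) :
    PySem.Dict String Int × Int × Int :=
  let out := (PySem.List.pyGet? discount (start - 1)).getD ""
  let e1 := if s.1.getD out 0 > allow.getD out 0 then s.2.1 - 1 else s.2.1
  let cnt1 := s.1.insert out (s.1.getD out 0 - 1)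
  let nw := (PySem.List.pyGet? discount (start + 9)).getD ""
  let c2 := cnt1.getD nw 0 + 1
  let e2 := if c2 > allow.getD nw 0 then e1 + 1 else e1
  (cnt1.insert nw c2, e2, if e2 = 0 then s.2.2 + 1 else s.2.2)

-- B's excess counter, characterised recursively over the window contents
def eSum (ag : String → Int) : List String → Int
  | [] => 0
  | x :: m => eSum ag m + (if (m.count x : Int) + 1 > ag x then 1 else 0)

theorem solution_eq_fold (want : List String) (number : List Int) (discount : List String) :
    solution want number discount
      = ((PySem.List.pyRange 0 ((discount.length : Int) - 10 + 1) 1).foldl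
          (Abody want number discount) (PySem.Dict.empty, 0)).2 := rfl

theorem solution_alt_eq_fold (want : List String) (number : List Int) (discount : List String) :
    solution_alt want number discount
      = if (discount.length : Int) < 10 then 0
        else
          let allow := (PySem.List.pyRange 0 (want.length : Int) 1).foldl
            (fun (d : PySem.Dict String Int) i =>
              d.insert ((PySem.List.pyGet? want i).getD "") ((PySem.List.pyGet? number i).getD 0))
            PySem.Dict.empty
          let st := (PySem.List.pyRange 0 10 1).foldl
            (fun s i => addStep (fun x => allow.getD x 0) s ((PySem.List.pyGet? discount i).getD ""))
            (PySem.Dict.empty, 0)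
          let days0 : Int := if st.2 = 0 then 1 else 0
          ((PySem.List.pyRange 1 ((discount.length : Int) - 9) 1).foldl
            (Bslide allow discount) (st.1, st.2, days0)).2.2 := rfl

-- index loops over discount are element loops over the corresponding segment
theorem fold_idx_eq_list {α : Type} (g : α → String → α) (discount : List String) (len : Nat) :
    ∀ (a : Nat) (s : α), a + len ≤ discount.length →
      (PySem.List.pyRange (a : Int) ((a : Int) + (len : Int)) 1).foldl
          (fun s i => g s ((PySem.List.pyGet? discount i).getD "")) s
        = ((discount.drop a).take len).foldl g s := by
  induction len with
  | zero => intro a s _; simp [PySem.List.pyRange_one_eq_nil]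
  | succ n ih =>
    intro a s h
    have ha : a < discount.length := by omega
    rw [PySem.List.pyRange_one_cons (by push_cast; omega), List.foldl_cons]
    have hhead : g s ((PySem.List.pyGet? discount (a : Int)).getD "") = g s discount[a] := by
      simp [PySem.List.pyGet?_natCast, List.getElem?_eq_getElem ha]
    have htail : ((a : Int) + 1) = ((a + 1 : Nat) : Int) := by push_cast; ring
    have hend : ((a : Int) + ((n + 1 : Nat) : Int)) = ((a + 1 : Nat) : Int) + (n : Int) := by
      push_cast; ring
    rw [hhead, hend, htail, ih (a + 1) _ (by omega)]
    have : (discount.drop a).take (n + 1)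
        = discount[a] :: (discount.drop (a + 1)).take n := by
      rw [← List.getElem_cons_drop ha, List.take_succ_cons]
    rw [this, List.foldl_cons]

-- the index-based wishlist/allowance build is the fold over the zipped pairs
theorem build_eq_zip (want : List String) :
    ∀ (number : List Int) (d : PySem.Dict String Int), want.length ≤ number.length →
      (List.range want.length).foldl
          (fun d i => d.insert (want[i]?.getD "") (number[i]?.getD 0)) d
        = (want.zip number).foldl pairIns d := by
  induction want with
  | nil => intro number d _; simp
  | cons w ws ih =>
    intro number d h
    cases number with
    | nil => simp at h
    | cons m ms =>
      simp only [List.length_cons, List.range_succ_eq_map, List.foldl_cons, List.foldl_map,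
        List.getElem?_cons_zero, Option.getD_some, List.zip_cons_cons]
      have : (fun (d : PySem.Dict String Int) (i : Nat) =>
          d.insert ((w :: ws)[i.succ]?.getD "") ((m :: ms)[i.succ]?.getD 0))
          = fun d i => d.insert (ws[i]?.getD "") (ms[i]?.getD 0) := by
        funext d i; simp
      rw [this]
      exact ih ms (d.insert w m) (by simpa using h)

theorem buildAllow_eq (want : List String) (number : List Int) (d : PySem.Dict String Int)
    (hlen : want.length ≤ number.length) :
    (PySem.List.pyRange 0 (want.length : Int) 1).foldl
        (fun d i => d.insert ((PySem.List.pyGet? want i).getD "")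
                             ((PySem.List.pyGet? number i).getD 0)) d
      = (want.zip number).foldl pairIns d := by
  rw [PySem.List.pyRange_zero_natCast, List.foldl_map]
  rw [← build_eq_zip want number d hlen]
  congr 1
  funext d i
  rw [PySem.List.pyGet?_natCast, PySem.List.pyGet?_natCast]

-- lookups after the pair fold: absent keys fall through …
theorem get?_pairfold_not_mem (zs : List (String × Int)) (d : PySem.Dict String Int)
    (k : String) (hk : k ∉ zs.map Prod.fst) :
    (zs.foldl pairIns d).get? k = d.get? k := by
  induction zs generalizing d with
  | nil => rfl
  | cons p rest ih =>
    simp only [List.map_cons, List.mem_cons, not_or] at hk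
    rw [List.foldl_cons, ih _ hk.2]
    simp [pairIns, PySem.Dict.get?_insert, hk.1]

-- … and present keys do not depend on the start dict
theorem get?_pairfold_mem (zs : List (String × Int)) (k : String) (hk : k ∈ zs.map Prod.fst) :
    ∀ (d d' : PySem.Dict String Int), (zs.foldl pairIns d).get? k = (zs.foldl pairIns d').get? k := by
  induction zs with
  | nil => simp at hk
  | cons p rest ih =>
    intro d d'
    by_cases hr : k ∈ rest.map Prod.fst
    · exact ih hr _ _
    · have hkp : k = p.1 := by
        simp only [List.map_cons, List.mem_cons] at hk; tauto
      rw [List.foldl_cons, List.foldl_cons,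
        get?_pairfold_not_mem rest _ k hr, get?_pairfold_not_mem rest _ k hr, hkp]
      simp [pairIns, PySem.Dict.get?_insert_self]

-- a broken window loop stays broken and leaves the dict alone
theorem foldl_listStep_false (l : List String) (d : PySem.Dict String Int) :
    l.foldl listStep (d, false) = (d, false) := by
  induction l with
  | nil => rfl
  | cons x xs ih => simpa [listStep] using ih

-- A's consume loop succeeds iff every window item is within its allowance
theorem consume_iff (ws : List String) :
    ∀ (D : PySem.Dict String Int),
      ((ws.foldl listStep (D, true)).2 = true
        ↔ ∀ k ∈ ws, ∃ v, D.get? k = some v ∧ ((ws.count k : Int) ≤ v)) := by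
  induction ws with
  | nil => intro D; simp
  | cons x xs ih =>
    intro D
    rw [List.foldl_cons]
    rcases hx : D.get? x with _ | v
    · have : listStep (D, true) x = (D, false) := by simp [listStep, hx]
      rw [this, foldl_listStep_false]
      simp only [Bool.false_eq_true, false_iff]
      intro hall
      obtain ⟨v, hv, _⟩ := hall x (List.mem_cons_self)
      simp [hx] at hv
    · by_cases hv0 : v - 1 < 0
      · have : listStep (D, true) x = (D, false) := by simp [listStep, hx, hv0]
        rw [this, foldl_listStep_false]
        simp only [Bool.false_eq_true, false_iff]
        intro hall
        obtain ⟨u, hu, hcnt⟩ := hall x (List.mem_cons_self)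
        rw [hx] at hu; obtain rfl : v = u := by injection hu
        have : 1 ≤ (x :: xs).count x := List.count_pos_iff.mpr (List.mem_cons_self)
        omega
      · have : listStep (D, true) x = (D.insert x (v - 1), true) := by
          simp [listStep, hx, hv0]
        rw [this, ih (D.insert x (v - 1))]
        constructor
        · intro H k hk
          rcases List.mem_cons.mp hk with rfl | hkxs
          · refine ⟨v, hx, ?_⟩
            by_cases hxin : k ∈ xs
            · obtain ⟨u, hu, hcnt⟩ := H k hxin
              rw [PySem.Dict.get?_insert, if_pos rfl] at hu
              obtain rfl : v - 1 = u := by injection hu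
              have : (k :: xs).count k = xs.count k + 1 := by simp
              rw [this]; push_cast; omega
            · have : (k :: xs).count k = 1 := by
                simp [List.count_eq_zero.mpr hxin]
              rw [this]; omega
          · obtain ⟨u, hu, hcnt⟩ := H k hkxs
            rw [PySem.Dict.get?_insert] at hu
            by_cases hkx : k = x
            · subst hkx
              rw [if_pos rfl] at hu
              obtain rfl : v - 1 = u := by injection hu
              refine ⟨v, hx, ?_⟩
              have : (k :: xs).count k = xs.count k + 1 := by simp
              rw [this]; push_cast; omega
            · rw [if_neg hkx] at hu
              refine ⟨u, hu, ?_⟩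
              have : (x :: xs).count k = xs.count k := by
                simp [Ne.symm hkx]
              rw [this]; exact hcnt
        · intro H k hk
          rw [PySem.Dict.get?_insert]
          by_cases hkx : k = x
          · subst hkx
            obtain ⟨u, hu, hcnt⟩ := H k (List.mem_cons_self)
            rw [hx] at hu; obtain rfl : v = u := by injection hu
            refine ⟨v - 1, by rw [if_pos rfl], ?_⟩
            have : (k :: xs).count k = xs.count k + 1 := by simp
            rw [this] at hcnt; push_cast at hcnt ⊢; omega
          · obtain ⟨u, hu, hcnt⟩ := H k (List.mem_cons_of_mem _ hk)
            refine ⟨u, by rw [if_neg hkx]; exact hu, ?_⟩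
            have : (x :: xs).count k = xs.count k := by
              simp [Ne.symm hkx]
            rw [this] at hcnt; exact hcnt

-- the consume loop never creates keys outside the start dict
theorem fold_listStep_dom (ws : List String) :
    ∀ (D : PySem.Dict String Int) (b : Bool) (k : String),
      ((ws.foldl listStep (D, b)).1).get? k ≠ none → D.get? k ≠ none := by
  induction ws with
  | nil => intro D b k h; exact h
  | cons x xs ih =>
    intro D b k h
    rw [List.foldl_cons] at h
    cases b with
    | false =>
      have : listStep (D, false) x = (D, false) := by simp [listStep]
      rw [this] at h; exact ih D false k h
    | true =>
      rcases hx : D.get? x with _ | v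
      · have : listStep (D, true) x = (D, false) := by simp [listStep, hx]
        rw [this] at h; exact ih D false k h
      · by_cases hv0 : v - 1 < 0
        · have : listStep (D, true) x = (D, false) := by simp [listStep, hx, hv0]
          rw [this] at h; exact ih D false k h
        · have : listStep (D, true) x = (D.insert x (v - 1), true) := by
            simp [listStep, hx, hv0]
          rw [this] at h
          have h2 := ih _ true k h
          rw [PySem.Dict.get?_insert] at h2
          by_cases hkx : k = x
          · subst hkx; rw [hx]; simp
          · rwa [if_neg hkx] at h2

-- the shared verdict, in A's get?-based form
theorem good_bridge (want : List String) (number : List Int) (ws : List String) :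
    ((∀ k ∈ ws, ∃ v, (allowD want number).get? k = some v ∧ ((ws.count k : Int) ≤ v))
      ↔ (ws.all (fun k => decide ((ws.count k : Int) ≤ agI want number k)) = true)) := by
  rw [List.all_eq_true]
  constructor
  · intro H k hk
    obtain ⟨v, hv, hc⟩ := H k hk
    simp only [decide_eq_true_eq, agI]
    rw [PySem.Dict.getD_eq_get?_getD, hv, Option.getD_some]
    exact hc
  · intro H k hk
    have h1 : (1 : Int) ≤ (ws.count k : Int) := by
      have := List.count_pos_iff.mpr hk; omega
    have h2 := H k hk
    simp only [decide_eq_true_eq, agI, PySem.Dict.getD_eq_get?_getD] at h2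
    rcases hv : (allowD want number).get? k with _ | v
    · rw [hv] at h2; simp at h2; omega
    · rw [hv] at h2; exact ⟨v, rfl, h2⟩

-- eSum facts
theorem eSum_nonneg (ag : String → Int) (m : List String) : 0 ≤ eSum ag m := by
  induction m with
  | nil => simp [eSum]
  | cons x m ih => simp only [eSum]; split <;> omega

theorem eSum_perm (ag : String → Int) {m m' : List String} (h : m.Perm m') :
    eSum ag m = eSum ag m' := by
  induction h with
  | nil => rfl
  | cons x h ih =>
    simp only [eSum, ih, h.count_eq]
  | swap x y l =>
    by_cases hxy : x = y
    · subst hxy; rfl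
    · simp [eSum, hxy, (Ne.symm hxy : ¬ y = x)]
      split_ifs <;> omega
  | trans h1 h2 ih1 ih2 => exact ih1.trans ih2

theorem eSum_eq_zero_iff (ag : String → Int) (m : List String) :
    eSum ag m = 0 ↔ ∀ k ∈ m, (m.count k : Int) ≤ ag k := by
  induction m with
  | nil => simp [eSum]
  | cons x m ih =>
    have hnn := eSum_nonneg ag m
    have hcx : ((x :: m).count x : Int) = (m.count x : Int) + 1 := by
      rw [List.count_cons_self]; push_cast; ring
    constructor
    · intro h
      have hsplit : eSum ag m = 0 ∧ (m.count x : Int) + 1 ≤ ag x := by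
        simp only [eSum] at h; split at h <;> omega
      intro k hk
      by_cases hkx : k = x
      · subst hkx; rw [hcx]; exact hsplit.2
      · have hkm : k ∈ m := by
          rcases List.mem_cons.mp hk with h' | h'
          · exact absurd h' hkx
          · exact h'
        have hc : (x :: m).count k = m.count k := by
          have hxk : x ≠ k := fun h => hkx h.symm
          simp [hxk]
        rw [hc]; exact (ih.mp hsplit.1) k hkm
    · intro H
      have h2 : (m.count x : Int) + 1 ≤ ag x := by
        have := H x List.mem_cons_self
        rw [hcx] at this; exact this
      have h1 : eSum ag m = 0 := by
        apply ih.mpr; intro k hk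
        have hh := H k (List.mem_cons_of_mem _ hk)
        have hc : m.count k ≤ (x :: m).count k := by
          rw [List.count_cons]; split <;> omega
        push_cast at hh ⊢
        omega
      simp only [eSum, h1, if_neg (by omega : ¬((m.count x : Int) + 1 > ag x))]
      omega

-- countP over a shifted range, peeled at the front
theorem countP_range_succ_shift (p : Nat → Bool) (n : Nat) :
    (List.range (n + 1)).countP p
      = (if p 0 then 1 else 0) + (List.range n).countP (fun j => p (j + 1)) := by
  rw [List.range_succ_eq_map, List.countP_cons, List.countP_map]
  have : (p ∘ Nat.succ) = fun j => p (j + 1) := by funext j; rfl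
  rw [this]
  split <;> omega

-- A-side: the outer loop counts the good windows
theorem Aloop (want : List String) (number : List Int) (discount : List String)
    (hlen : want.length ≤ number.length) :
    ∀ (len a : Nat), a + len + 9 ≤ discount.length →
    ∀ (d : PySem.Dict String Int) (days : Int),
      (∀ k, k ∉ want → d.get? k = none) →
      ((PySem.List.pyRange (a : Int) ((a : Int) + (len : Int)) 1).foldl
          (Abody want number discount) (d, days)).2
        = days + ((List.range len).countP (fun j => goodB want number discount (a + j)) : Int) := by
  intro len
  induction len with
  | zero =>
    intro a h d days hinv
    rw [show ((a : Int) + ((0 : Nat) : Int)) = (a : Int) by push_cast; ring,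
      PySem.List.pyRange_one_eq_nil (le_refl _)]
    simp
  | succ n ih =>
    intro a h d days hinv
    have ha10 : a + 10 ≤ discount.length := by omega
    rw [PySem.List.pyRange_one_cons (by push_cast; omega), List.foldl_cons]
    have hfst : (want.zip number).map Prod.fst = want := List.map_fst_zip hlen
    have hwl : ∀ k, ((PySem.List.pyRange 0 (want.length : Int) 1).foldl
        (fun d i => d.insert ((PySem.List.pyGet? want i).getD "")
                             ((PySem.List.pyGet? number i).getD 0)) d).get? k
        = (allowD want number).get? k := by
      intro k
      rw [buildAllow_eq want number d hlen]
      by_cases hk : k ∈ want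
      · exact get?_pairfold_mem (want.zip number) k (by rwa [hfst]) d PySem.Dict.empty
      · rw [get?_pairfold_not_mem _ _ _ (by rwa [hfst]), hinv k hk]
        unfold allowD
        rw [get?_pairfold_not_mem _ _ _ (by rwa [hfst])]
        rfl
    -- A's window loop over indices is the element loop over the window
    have hA : ∀ (s : PySem.Dict String Int × Bool),
        (PySem.List.pyRange (a : Int) ((a : Int) + 10) 1).foldl
            (fun s i => listStep s ((PySem.List.pyGet? discount i).getD "")) s
          = (winL discount a).foldl listStep s := by
      intro s
      have h10 : ((a : Int) + 10) = ((a : Int) + ((10 : Nat) : Int)) := by norm_num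
      rw [h10, fold_idx_eq_list listStep discount 10 a s ha10]
      rfl
    -- the window verdict is goodB
    have hflag : ∀ (D : PySem.Dict String Int), (∀ k, D.get? k = (allowD want number).get? k) →
        ((winL discount a).foldl listStep (D, true)).2 = goodB want number discount a := by
      intro D hD
      rw [Bool.eq_iff_iff, consume_iff, goodB, ← good_bridge]
      constructor
      · intro H k hk; obtain ⟨v, hv, hc⟩ := H k hk; exact ⟨v, by rw [← hD k]; exact hv, hc⟩
      · intro H k hk; obtain ⟨v, hv, hc⟩ := H k hk; exact ⟨v, by rw [hD k]; exact hv, hc⟩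
    have hstep : Abody want number discount (d, days) ((a : Nat) : Int)
        = (((winL discount a).foldl listStep
              ((PySem.List.pyRange 0 (want.length : Int) 1).foldl
                (fun d i => d.insert ((PySem.List.pyGet? want i).getD "")
                                     ((PySem.List.pyGet? number i).getD 0)) d, true)).1,
           if goodB want number discount a then days + 1 else days) := by
      simp only [Abody]
      rw [hA, hflag _ hwl]
    have hinv2 : ∀ k, k ∉ want →
        (((winL discount a).foldl listStep
            ((PySem.List.pyRange 0 (want.length : Int) 1).foldl
              (fun d i => d.insert ((PySem.List.pyGet? want i).getD "")
                                   ((PySem.List.pyGet? number i).getD 0)) d, true)).1).get? k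
          = none := by
      intro k hk
      by_contra hne
      have h1 := fold_listStep_dom _ _ _ k hne
      rw [hwl k] at h1
      have : (allowD want number).get? k = none := by
        unfold allowD
        rw [get?_pairfold_not_mem _ _ _ (by rwa [hfst])]
        rfl
      exact h1 this
    rw [hstep]
    have htail : ((a : Int) + 1) = ((a + 1 : Nat) : Int) := by push_cast; ring
    have hend : ((a : Int) + ((n + 1 : Nat) : Int)) = ((a + 1 : Nat) : Int) + (n : Int) := by
      push_cast; ring
    rw [hend, htail, ih (a + 1) (by omega) _ _ hinv2]
    rw [countP_range_succ_shift (fun j => goodB want number discount (a + j)) n]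
    have hfun : (fun j => goodB want number discount (a + (j + 1)))
        = fun j => goodB want number discount (a + 1 + j) := by
      funext j; congr 1; omega
    rw [hfun]
    have : a + 0 = a := by omega
    rw [this]
    split <;> push_cast <;> ring

-- B-side: the add loop maintains counts and excess
theorem addFold (ag : String → Int) (xs : List String) :
    ∀ (cnt : PySem.Dict String Int) (e : Int) (m : List String),
      (∀ k, cnt.getD k 0 = (m.count k : Int)) → e = eSum ag m →
      ((xs.foldl (addStep ag) (cnt, e)).1.getD · 0) = (fun k => ((xs.reverse ++ m).count k : Int))
        ∧ (xs.foldl (addStep ag) (cnt, e)).2 = eSum ag (xs.reverse ++ m) := by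
  induction xs with
  | nil =>
    intro cnt e m hc he
    refine ⟨funext fun k => ?_, by simpa using he⟩
    simpa using hc k
  | cons x xs ih =>
    intro cnt e m hc he
    rw [List.foldl_cons]
    have hstep : addStep ag (cnt, e) x
        = (cnt.insert x ((m.count x : Int) + 1), eSum ag (x :: m)) := by
      simp only [addStep, hc x, he, eSum]
      split <;> rw [Prod.mk.injEq] <;> exact ⟨rfl, by omega⟩
    have hc' : ∀ k, (cnt.insert x ((m.count x : Int) + 1)).getD k 0 = ((x :: m).count k : Int) := by
      intro k
      rw [PySem.Dict.getD_insert]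
      by_cases hkx : k = x
      · subst hkx; rw [if_pos rfl, List.count_cons_self]; push_cast; ring
      · rw [if_neg hkx, hc k]
        have hxk : x ≠ k := fun h => hkx h.symm
        have : (x :: m).count k = m.count k := by simp [hxk]
        rw [this]
    have hl : xs.reverse ++ x :: m = (x :: xs).reverse ++ m := by simp
    have := ih (cnt.insert x ((m.count x : Int) + 1)) (eSum ag (x :: m)) (x :: m) hc' rfl
    rw [hl] at this
    rw [hstep]
    exact this

-- B-side: one slide step moves the invariant one window forward
theorem slideStep (want : List String) (number : List Int) (discount : List String)
    (b : Nat) (hb : b + 11 ≤ discount.length)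
    (cnt : PySem.Dict String Int) (e days : Int)
    (hc : ∀ k, cnt.getD k 0 = ((winL discount b).count k : Int))
    (he : e = eSum (agI want number) (winL discount b)) :
    ∃ cnt', Bslide (allowD want number) discount (cnt, e, days) ((b + 1 : Nat) : Int)
        = (cnt', eSum (agI want number) (winL discount (b + 1)),
           if goodB want number discount (b + 1) then days + 1 else days)
      ∧ ∀ k, cnt'.getD k 0 = ((winL discount (b + 1)).count k : Int) := by
  have hbL : b < discount.length := by omega
  have hb10 : b + 10 < discount.length := by omega
  have hagD : ∀ z, (allowD want number).getD z 0 = agI want number z := fun z => rfl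
  have hidx1 : ((b + 1 : Nat) : Int) - 1 = ((b : Nat) : Int) := by push_cast; ring
  have hidx2 : ((b + 1 : Nat) : Int) + 9 = ((b + 10 : Nat) : Int) := by push_cast; ring
  have hout : (PySem.List.pyGet? discount (((b + 1 : Nat) : Int) - 1)).getD "" = discount[b] := by
    rw [hidx1, PySem.List.pyGet?_natCast, List.getElem?_eq_getElem hbL]; rfl
  have hnw : (PySem.List.pyGet? discount (((b + 1 : Nat) : Int) + 9)).getD "" = discount[b + 10] := by
    rw [hidx2, PySem.List.pyGet?_natCast, List.getElem?_eq_getElem hb10]; rfl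
  have hw : winL discount b = discount[b] :: (discount.drop (b + 1)).take 9 := by
    rw [winL, ← List.getElem_cons_drop hbL, List.take_succ_cons]
  have h1 : (discount.drop (b + 1))[9]? = some discount[b + 10] := by
    rw [List.getElem?_drop,
      List.getElem?_eq_getElem (show b + 1 + 9 < discount.length by omega), Option.some_inj]
  have hw2 : winL discount (b + 1) = (discount.drop (b + 1)).take 9 ++ [discount[b + 10]] := by
    rw [winL, List.take_add_one, h1]
    rfl
  have hperm : ((discount.drop (b + 1)).take 9 ++ [discount[b + 10]]).Perm
      (discount[b + 10] :: (discount.drop (b + 1)).take 9) :=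
    List.perm_append_singleton _ _
  have hcnt2 : ∀ k, ((winL discount (b + 1)).count k : Int)
      = ((discount[b + 10] :: (discount.drop (b + 1)).take 9).count k : Int) := by
    intro k; rw [hw2, hperm.count_eq]
  have heS2 : eSum (agI want number) (winL discount (b + 1))
      = eSum (agI want number) (discount[b + 10] :: (discount.drop (b + 1)).take 9) := by
    rw [hw2, eSum_perm _ hperm]
  have hcout : cnt.getD discount[b] 0 = (((discount.drop (b + 1)).take 9).count discount[b] : Int) + 1 := by
    rw [hc, hw, List.count_cons_self]; push_cast; ring
  have hc1 : ∀ k, (cnt.insert discount[b] (cnt.getD discount[b] 0 - 1)).getD k 0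
      = (((discount.drop (b + 1)).take 9).count k : Int) := by
    intro k
    rw [PySem.Dict.getD_insert]
    by_cases hkx : k = discount[b]
    · rw [if_pos hkx, hcout, hkx]; ring
    · rw [if_neg hkx, hc k, hw]
      have hxk : discount[b] ≠ k := fun h => hkx h.symm
      have : (discount[b] :: (discount.drop (b + 1)).take 9).count k
          = ((discount.drop (b + 1)).take 9).count k := by simp [hxk]
      rw [this]
  have he' : e = eSum (agI want number) ((discount.drop (b + 1)).take 9)
      + (if (((discount.drop (b + 1)).take 9).count discount[b] : Int) + 1
            > agI want number discount[b] then 1 else 0) := by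
    rw [he, hw]; rfl
  have hgood : (eSum (agI want number) (winL discount (b + 1)) = 0)
      ↔ (goodB want number discount (b + 1) = true) := by
    rw [eSum_eq_zero_iff, goodB, List.all_eq_true]
    constructor
    · intro H k hk; simpa using H k hk
    · intro H k hk; simpa using H k hk
  have hBs : Bslide (allowD want number) discount (cnt, e, days) ((b + 1 : Nat) : Int)
      = ((cnt.insert discount[b] (cnt.getD discount[b] 0 - 1)).insert discount[b + 10]
           ((cnt.insert discount[b] (cnt.getD discount[b] 0 - 1)).getD discount[b + 10] 0 + 1),
         (if (cnt.insert discount[b] (cnt.getD discount[b] 0 - 1)).getD discount[b + 10] 0 + 1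
              > (allowD want number).getD discount[b + 10] 0
          then (if cnt.getD discount[b] 0 > (allowD want number).getD discount[b] 0
                then e - 1 else e) + 1
          else (if cnt.getD discount[b] 0 > (allowD want number).getD discount[b] 0
                then e - 1 else e)),
         (if (if (cnt.insert discount[b] (cnt.getD discount[b] 0 - 1)).getD discount[b + 10] 0 + 1
                  > (allowD want number).getD discount[b + 10] 0
              then (if cnt.getD discount[b] 0 > (allowD want number).getD discount[b] 0
                    then e - 1 else e) + 1
              else (if cnt.getD discount[b] 0 > (allowD want number).getD discount[b] 0
                    then e - 1 else e)) = 0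
          then days + 1 else days)) := by
    simp only [Bslide, hout, hnw]
  have he1 : (if cnt.getD discount[b] 0 > (allowD want number).getD discount[b] 0 then e - 1 else e)
      = eSum (agI want number) ((discount.drop (b + 1)).take 9) := by
    rw [hagD, hcout, he']
    split <;> omega
  have he2 : (if (cnt.insert discount[b] (cnt.getD discount[b] 0 - 1)).getD discount[b + 10] 0 + 1
          > (allowD want number).getD discount[b + 10] 0
        then (if cnt.getD discount[b] 0 > (allowD want number).getD discount[b] 0
              then e - 1 else e) + 1
        else (if cnt.getD discount[b] 0 > (allowD want number).getD discount[b] 0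
              then e - 1 else e))
      = eSum (agI want number) (winL discount (b + 1)) := by
    rw [he1, hc1, hagD, heS2]
    simp only [eSum]
    split <;> omega
  have hc2 : ∀ k, ((cnt.insert discount[b] (cnt.getD discount[b] 0 - 1)).insert discount[b + 10]
        ((cnt.insert discount[b] (cnt.getD discount[b] 0 - 1)).getD discount[b + 10] 0 + 1)).getD k 0
      = ((winL discount (b + 1)).count k : Int) := by
    intro k
    rw [hcnt2 k, PySem.Dict.getD_insert]
    by_cases hkx : k = discount[b + 10]
    · rw [if_pos hkx, hc1, hkx, List.count_cons_self]; push_cast; ring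
    · rw [if_neg hkx, hc1 k]
      have hxk : discount[b + 10] ≠ k := fun h => hkx h.symm
      have : (discount[b + 10] :: (discount.drop (b + 1)).take 9).count k
          = ((discount.drop (b + 1)).take 9).count k := by simp [hxk]
      rw [this]
  refine ⟨_, ?_, hc2⟩
  rw [hBs, Prod.mk.injEq, Prod.mk.injEq]
  exact ⟨rfl, he2, by rw [he2, if_congr hgood rfl rfl]⟩

-- excess-is-zero is the window verdict
theorem eSum_goodB (want : List String) (number : List Int) (discount : List String) (a : Nat) :
    (eSum (agI want number) (winL discount a) = 0) ↔ (goodB want number discount a = true) := by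
  rw [eSum_eq_zero_iff, goodB, List.all_eq_true]
  constructor <;> intro H k hk <;> simpa using H k hk

-- B-side: the main loop counts the good windows from start 1 on
theorem Bloop (want : List String) (number : List Int) (discount : List String) :
    ∀ (len b : Nat) (cnt : PySem.Dict String Int) (e days : Int),
      b + 10 + len ≤ discount.length →
      (∀ k, cnt.getD k 0 = ((winL discount b).count k : Int)) →
      e = eSum (agI want number) (winL discount b) →
      ((PySem.List.pyRange ((b + 1 : Nat) : Int) (((b + 1 : Nat) : Int) + (len : Int)) 1).foldl
          (Bslide (allowD want number) discount) (cnt, e, days)).2.2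
        = days + ((List.range len).countP (fun j => goodB want number discount (b + 1 + j)) : Int) := by
  intro len
  induction len with
  | zero =>
    intro b cnt e days h hcinv heinv
    rw [show (((b + 1 : Nat) : Int) + ((0 : Nat) : Int)) = ((b + 1 : Nat) : Int) by push_cast; ring,
      PySem.List.pyRange_one_eq_nil (le_refl _)]
    simp
  | succ n ih =>
    intro b cnt e days h hcinv heinv
    rw [PySem.List.pyRange_one_cons (by push_cast; omega), List.foldl_cons]
    obtain ⟨cnt', heq, hc'⟩ := slideStep want number discount b (by omega) cnt e days hcinv heinv
    rw [heq]
    have htail : (((b + 1 : Nat) : Int) + 1) = (((b + 1) + 1 : Nat) : Int) := by push_cast; ring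
    have hend : (((b + 1 : Nat) : Int) + ((n + 1 : Nat) : Int))
        = ((((b + 1) + 1 : Nat) : Int) + (n : Int)) := by push_cast; ring
    rw [hend, htail, ih (b + 1) cnt' _ _ (by omega) hc' rfl]
    rw [countP_range_succ_shift (fun j => goodB want number discount (b + 1 + j)) n]
    have hfun : (fun j => goodB want number discount (b + 1 + (j + 1)))
        = fun j => goodB want number discount (b + 1 + 1 + j) := by
      funext j; congr 1; omega
    rw [hfun]
    have hz : b + 1 + 0 = b + 1 := by omega
    rw [hz]
    split <;> push_cast <;> ring

-- both ports compute the number of good windows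
theorem A_canon (want : List String) (number : List Int) (discount : List String)
    (hlen : want.length ≤ number.length) :
    solution want number discount
      = ((List.range (discount.length - 9)).countP (goodB want number discount) : Int) := by
  rw [solution_eq_fold]
  by_cases hd : discount.length < 10
  · rw [PySem.List.pyRange_one_eq_nil (by omega)]
    have h0 : discount.length - 9 = 0 := by omega
    rw [h0]
    rfl
  · have := Aloop want number discount hlen (discount.length - 9) 0 (by omega)
      PySem.Dict.empty 0 (fun _ _ => rfl)
    rw [show (((0 : Nat) : Int) + ((discount.length - 9 : Nat) : Int))
        = (discount.length : Int) - 10 + 1 by push_cast; omega,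
      show ((0 : Nat) : Int) = (0 : Int) by norm_num] at this
    rw [this]
    have hfun : (fun j => goodB want number discount (0 + j)) = goodB want number discount := by
      funext j; rw [Nat.zero_add]
    rw [hfun]
    ring

theorem B_canon (want : List String) (number : List Int) (discount : List String)
    (hlen : want.length ≤ number.length) :
    solution_alt want number discount
      = ((List.range (discount.length - 9)).countP (goodB want number discount) : Int) := by
  rw [solution_alt_eq_fold]
  by_cases hd : discount.length < 10
  · rw [if_pos (by omega)]
    have h0 : discount.length - 9 = 0 := by omega
    rw [h0]
    rfl
  · rw [if_neg (by omega)]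
    simp only [buildAllow_eq want number PySem.Dict.empty hlen]
    have hAllow : (want.zip number).foldl pairIns PySem.Dict.empty = allowD want number := rfl
    rw [hAllow]
    have hAg : (fun x => (allowD want number).getD x (0 : Int)) = agI want number := rfl
    rw [hAg]
    -- init loop: counts and excess of the first window
    have hidx := fold_idx_eq_list (addStep (agI want number)) discount 10 0
      (PySem.Dict.empty, (0 : Int)) (by omega)
    norm_num at hidx
    rw [hidx]
    obtain ⟨hfc, hfe⟩ := addFold (agI want number) (discount.take 10)
      PySem.Dict.empty 0 [] (fun k => by simp) rfl
    have hrev : ((discount.take 10).reverse ++ []).Perm (winL discount 0) := by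
      rw [List.append_nil, winL, List.drop_zero]
      exact List.reverse_perm _
    have hc0 : ∀ k, ((discount.take 10).foldl (addStep (agI want number))
        (PySem.Dict.empty, (0 : Int))).1.getD k 0 = ((winL discount 0).count k : Int) := by
      intro k
      rw [congrFun hfc k, hrev.count_eq]
    have he0 : ((discount.take 10).foldl (addStep (agI want number))
        (PySem.Dict.empty, (0 : Int))).2 = eSum (agI want number) (winL discount 0) := by
      rw [hfe, eSum_perm _ hrev]
    set m0 := (discount.take 10).foldl (addStep (agI want number))
      (PySem.Dict.empty, (0 : Int)) with hm0
    generalize hd0 : (if m0.2 = (0 : Int) then (1 : Int) else 0) = days0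
    -- main loop
    have hmain := Bloop want number discount (discount.length - 10) 0 m0.1 m0.2 days0
      (by omega) hc0 he0
    have harg2 : (((0 + 1 : Nat)) : Int) + ((discount.length - 10 : Nat) : Int)
        = (discount.length : Int) - 9 := by push_cast; omega
    have harg1 : (((0 + 1 : Nat)) : Int) = (1 : Int) := by norm_num
    rw [harg2] at hmain
    rw [harg1] at hmain
    rw [hmain]
    have hdays0 : days0 = if goodB want number discount 0 then 1 else 0 := by
      rw [← hd0, he0, if_congr (eSum_goodB want number discount 0) rfl rfl]
    rw [hdays0]
    have hsplit : discount.length - 9 = (discount.length - 10) + 1 := by omega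
    rw [hsplit, countP_range_succ_shift (goodB want number discount) (discount.length - 10)]
    have hfun : (fun j => goodB want number discount (0 + 1 + j))
        = fun j => goodB want number discount (j + 1) := by
      funext j; congr 1; omega
    rw [hfun]
    split <;> push_cast <;> ring

-- ===== VERDICT (by name: the statement is the Claim_ definition above) =====
theorem solution_spec : Claim_equal_solution := by
  intro want number discount _ hpre
  unfold Spec_solution
  by_cases hd : discount.length < 10
  · by_cases hlen : want.length ≤ number.length
    · rw [A_canon want number discount hlen, B_canon want number discount hlen]
    · -- both ports short-circuit on fewer than 10 discount days
      rw [solution_eq_fold, solution_alt_eq_fold,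
        PySem.List.pyRange_one_eq_nil (by omega), if_pos (by omega)]
      rfl
  · have hlen : want.length ≤ number.length := by
      rcases hpre with h | h
      · exact h
      · omega
    rw [A_canon want number discount hlen, B_canon want number discount hlen]
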